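-- pv_equiv track=rewrite | github.com/jiyoungzero/2023-Codingtest-Study | jiyoung풀이/PGS문제/pgs_zerobaseTrie.py | solution
-- ===== SOURCE A (Python) =====
-- def solution(titles, lyrics, problems):
--     answer = []
--
--     for p in problems:
--         res = []
--         for i in range(len(lyrics)):
--             j = 0
--             flag = True
--             while j < len(p):
--                 if lyrics[i][j] == p[j]:
--                     j += 1
--                 else:
--                     flag = False
--                     break
--             if flag:
--                 res.append(titles[i])
--         answer.append(res)
--     return answer
-- ===== SOURCE B (Python) =====
-- def solution(titles, lyrics, problems):
--     # Index every prefix of every lyric once; each query is then a single lookup.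
--     index = {}
--     for lyric, title in zip(lyrics, titles):
--         for j in range(len(lyric) + 1):
--             index.setdefault(lyric[:j], []).append(title)
--     return [index.get(p, []) for p in problems]
-- ===== Notes on version B (the rewrite author's own statement) =====
-- stated objective: faster
-- what changed: Instead of re-scanning every lyric character by character for every query, B builds a hash index from every prefix of every lyric to the ordered list of matching titles once, and answers each query by a single dictionary lookup.
import Mathlib
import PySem

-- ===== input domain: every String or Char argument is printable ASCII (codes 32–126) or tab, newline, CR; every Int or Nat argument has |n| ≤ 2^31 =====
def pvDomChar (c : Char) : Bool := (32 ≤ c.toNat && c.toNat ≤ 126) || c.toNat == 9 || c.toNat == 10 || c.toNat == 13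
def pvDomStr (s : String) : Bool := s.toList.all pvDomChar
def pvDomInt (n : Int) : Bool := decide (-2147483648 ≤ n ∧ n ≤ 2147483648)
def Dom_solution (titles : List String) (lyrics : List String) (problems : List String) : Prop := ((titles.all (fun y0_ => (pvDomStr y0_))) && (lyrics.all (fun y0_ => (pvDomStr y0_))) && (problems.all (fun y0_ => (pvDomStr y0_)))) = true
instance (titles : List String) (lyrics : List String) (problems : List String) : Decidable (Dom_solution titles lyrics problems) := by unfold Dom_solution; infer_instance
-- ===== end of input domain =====

-- B replaces A's per-query character-by-character scan of all lyrics by a dictionary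
-- mapping each lyric prefix to its (ordered) titles, built once; objective: faster.

-- ===== PORT A =====
-- the 'while j < len(p)' loop: j advances along both strings simultaneously
def matchLoop : List Char → List Char → Bool
  | _, [] => true                 -- j reached len(p): flag stays True
  | [], _ :: _ => false           -- Python raises IndexError here (lyrics[i][j]); excluded by Pre_
  | c :: l, q :: p => if c = q then matchLoop l p else false   -- lyrics[i][j] == p[j] ?

def solution (titles : List String) (lyrics : List String) (problems : List String) : List (List String) :=
  problems.foldl (fun answer p =>
    answer ++ [(List.range lyrics.length).foldl (fun res i =>
      if matchLoop (lyrics.getD i "").toList p.toList then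
        res ++ [titles.getD i ""]   -- titles[i]; raises IndexError when i ≥ len(titles), excluded by Pre_
      else res) []]) []

-- ===== PORT B =====
-- index.setdefault(lyric[:j], []).append(title)  ≡  Dict.modify key [] (· ++ [title]);
-- lyric[:j] with 0 ≤ j ≤ len(lyric) is exactly 'take j'
def buildIndex (pairs : List (String × String)) : PySem.Dict String (List String) :=
  pairs.foldl (fun d lt =>
    (List.range (lt.1.length + 1)).foldl (fun d j =>
      d.modify (String.ofList (lt.1.toList.take j)) [] (· ++ [lt.2])) d) PySem.Dict.empty

def solution_alt (titles : List String) (lyrics : List String) (problems : List String) : List (List String) :=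
  problems.map (fun p => (buildIndex (lyrics.zip titles)).getD p [])

-- ===== PRECONDITION & SPEC =====
-- Pre_ excludes exactly the inputs on which Python A raises IndexError (and nothing else): a
-- lyric that is a proper prefix of some query (then lyrics[i][j] is out of range), or a lyric
-- matching some query at an index i ≥ len(titles) (then titles[i] is out of range).
def Pre_solution (titles : List String) (lyrics : List String) (problems : List String) : Prop :=
  (∀ p ∈ problems, ∀ l ∈ lyrics, ¬ (l.toList.length < p.toList.length ∧ l.toList <+: p.toList)) ∧
  (∀ p ∈ problems, ∀ i, i < lyrics.length → p.toList <+: (lyrics.getD i "").toList → i < titles.length)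
instance (titles : List String) (lyrics : List String) (problems : List String) : Decidable (Pre_solution titles lyrics problems) := by unfold Pre_solution; infer_instance

def pvWitness_solution : List String × List String × List String :=
  (["t1", "t2"], ["abc", "bd"], ["ab", "c", ""])

def Spec_solution (titles : List String) (lyrics : List String) (problems : List String) (out : List (List String)) : Prop := out = solution_alt titles lyrics problems
instance (titles : List String) (lyrics : List String) (problems : List String) (out : List (List String)) : Decidable (Spec_solution titles lyrics problems out) := by unfold Spec_solution; infer_instance

-- ===== CLAIM (what is proved, stated in full; the proofs are below) =====
def Claim_equal_solution : Prop := ∀ (titles : List String) (lyrics : List String) (problems : List String), Dom_solution titles lyrics problems → Pre_solution titles lyrics problems → Spec_solution titles lyrics problems (solution titles lyrics problems)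

-- ===== LEMMAS AND PROOFS =====

theorem matchLoop_eq_isPrefixOf : ∀ (l p : List Char), matchLoop l p = p.isPrefixOf l := by
  intro l p
  induction l generalizing p with
  | nil => cases p <;> rfl
  | cons c l ih =>
    cases p with
    | nil => rfl
    | cons q p =>
      show (if c = q then matchLoop l p else false) = ((q == c) && p.isPrefixOf l)
      rw [ih]
      by_cases h : c = q
      · simp [h]
      · have : (q == c) = false := by simpa using Ne.symm h
        simp [h, this]

theorem filter_range_eq_single (m c : Nat) :
    (List.range m).filter (fun j => decide (j = c)) = if c < m then [c] else [] := by
  induction m with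
  | zero => simp
  | succ m ih =>
    rw [List.range_succ, List.filter_append, ih]
    by_cases h : c < m
    · have : ¬ (m = c) := by omega
      simp [h, this, Nat.lt_succ_of_lt h]
    · by_cases h2 : c = m
      · simp [h2]
      · have : ¬ c < m + 1 := by omega
        simp [h, this, Ne.symm h2]

-- which loop indices j produce a given prefix: exactly one when it IS a prefix, none otherwise
theorem filter_take_eq (l kl : List Char) :
    (List.range (l.length + 1)).filter (fun j => decide (l.take j = kl))
      = if kl <+: l then [kl.length] else [] := by
  by_cases h : kl <+: l
  · rw [if_pos h]
    have hlen : kl.length ≤ l.length := h.length_le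
    calc (List.range (l.length + 1)).filter (fun j => decide (l.take j = kl))
        = (List.range (l.length + 1)).filter (fun j => decide (j = kl.length)) := by
          apply List.filter_congr
          intro j hj
          rw [List.mem_range, Nat.lt_succ_iff] at hj
          rw [decide_eq_decide]
          constructor
          · intro he
            have := congrArg List.length he
            simpa [Nat.min_eq_left hj] using this
          · intro he
            subst he
            exact (List.prefix_iff_eq_take.mp h).symm
      _ = [kl.length] := by
          rw [filter_range_eq_single, if_pos (by omega)]
  · rw [if_neg h, List.filter_eq_nil_iff]
    intro j _
    simp only [decide_eq_true_eq]
    intro he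
    exact h (he ▸ List.take_prefix j l)

-- lookup in the index after processing ONE (lyric, title) pair
theorem inner_getD (l t : String) (d : PySem.Dict String (List String)) (k : String) :
    ((List.range (l.length + 1)).foldl
        (fun d j => d.modify (String.ofList (l.toList.take j)) [] (· ++ [t])) d).getD k []
      = d.getD k [] ++ (if k.toList <+: l.toList then [t] else []) := by
  have hfold :
      (List.range (l.length + 1)).foldl
          (fun d j => d.modify (String.ofList (l.toList.take j)) [] (· ++ [t])) d
        = ((List.range (l.length + 1)).map (fun j => (String.ofList (l.toList.take j), t))).foldl
            (fun d p => d.modify p.1 [] (· ++ [p.2])) d := by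
    rw [List.foldl_map]
  rw [hfold, PySem.Dict.getD_foldl_modify_append]
  congr 1
  rw [List.filter_map]
  have hpred : ((fun p : String × String => p.1 == k) ∘ fun j => (String.ofList (l.toList.take j), t))
      = fun j => decide (l.toList.take j = k.toList) := by
    funext j
    simp only [Function.comp]
    by_cases he : l.toList.take j = k.toList
    · have : String.ofList (l.toList.take j) = k := by rw [he]; simp
      simp [this, he]
    · have : ¬ (String.ofList (l.toList.take j) = k) := by
        intro hc
        apply he
        rw [← hc]
        simp
      simp [this, he]
  rw [hpred]
  have hlen : l.length = l.toList.length := by simp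
  rw [hlen, filter_take_eq l.toList k.toList]
  by_cases h : k.toList <+: l.toList <;> simp [h]

-- lookup in the full index
theorem build_getD : ∀ (pairs : List (String × String)) (d : PySem.Dict String (List String)) (k : String),
    ((pairs.foldl (fun d lt =>
        (List.range (lt.1.length + 1)).foldl
          (fun d j => d.modify (String.ofList (lt.1.toList.take j)) [] (· ++ [lt.2])) d) d)).getD k []
      = d.getD k [] ++ (pairs.filter (fun lt => decide (k.toList <+: lt.1.toList))).map Prod.snd := by
  intro pairs
  induction pairs with
  | nil => simp
  | cons lt rest ih =>
    intro d k
    simp only [List.foldl_cons, List.filter_cons]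
    rw [ih, inner_getD]
    by_cases h : k.toList <+: lt.1.toList <;> simp [h]

-- A's per-query row equals B's per-query lookup, given every matching index is inside titles
theorem rows_eq : ∀ (lyrics titles : List String) (pl : List Char),
    (∀ i, i < lyrics.length → pl <+: (lyrics.getD i "").toList → i < titles.length) →
    ((List.range lyrics.length).filter (fun i => pl.isPrefixOf (lyrics.getD i "").toList)).map
        (fun i => titles.getD i "")
      = ((lyrics.zip titles).filter (fun lt => decide (pl <+: lt.1.toList))).map Prod.snd := by
  intro lyrics
  induction lyrics with
  | nil => intro titles pl _; simp
  | cons l ls ih =>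
    intro titles pl hcond
    rw [List.length_cons, List.range_succ_eq_map]
    have htail : ∀ (f : Nat → String),
        ((((List.range ls.length).map (fun i => i + 1)).filter
            (fun i => pl.isPrefixOf ((l :: ls).getD i "").toList)).map f)
          = ((List.range ls.length).filter (fun i => pl.isPrefixOf (ls.getD i "").toList)).map
              (fun i => f (i + 1)) := by
      intro f
      rw [List.filter_map, List.map_map]
      rfl
    cases titles with
    | nil =>
      have hnone : ∀ i ∈ (0 :: (List.range ls.length).map (fun i => i + 1)),
          ¬ (pl.isPrefixOf ((l :: ls).getD i "").toList = true) := by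
        intro i hi hp
        have hilt : i < ls.length + 1 := by
          rcases List.mem_cons.mp hi with h0 | h1
          · omega
          · obtain ⟨j, hj, rfl⟩ := List.mem_map.mp h1
            have := List.mem_range.mp hj
            omega
        have := hcond i (by simpa using hilt) (List.isPrefixOf_iff_prefix.mp hp)
        simp at this
      rw [List.filter_eq_nil_iff.mpr hnone]
      simp
    | cons t ts =>
      have hcond' : ∀ i, i < ls.length → pl <+: (ls.getD i "").toList → i < ts.length := by
        intro i hi hp
        have := hcond (i + 1) (by simp; omega) (by simpa using hp)
        simp at this
        omega
      have hshift : (fun i : Nat => (t :: ts).getD (i + 1) "") = fun i => ts.getD i "" := rfl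
      by_cases h : pl <+: l.toList
      · rw [List.filter_cons, if_pos (by simpa [List.isPrefixOf_iff_prefix] using h),
            List.map_cons, htail (fun i => (t :: ts).getD i ""), hshift, ih ts pl hcond']
        simp [List.filter_cons, h]
      · rw [List.filter_cons,
            if_neg (by simpa [List.isPrefixOf_iff_prefix] using h),
            htail (fun i => (t :: ts).getD i ""), hshift, ih ts pl hcond']
        simp [List.filter_cons, h]

-- ===== VERDICT (by name: the statement is the Claim_ definition above) =====
theorem solution_spec : Claim_equal_solution := by
  intro titles lyrics problems _ hpre
  unfold Spec_solution solution solution_alt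
  rw [PySem.List.foldl_append_singleton_eq_map, List.nil_append]
  apply List.map_congr_left
  intro p hp
  rw [PySem.List.foldl_append_if, List.nil_append]
  unfold buildIndex
  rw [build_getD, PySem.Dict.getD_empty, List.nil_append]
  have hm : (fun i => matchLoop (lyrics.getD i "").toList p.toList)
      = fun i => p.toList.isPrefixOf (lyrics.getD i "").toList := by
    funext i; exact matchLoop_eq_isPrefixOf _ _
  rw [hm]
  exact rows_eq lyrics titles p.toList (fun i hi hpre' => hpre.2 p hp i hi hpre')
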